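-- pv_equiv track=rewrite | github.com/vadzz-dev/Sollumz | sollumz_ui.py | param_name_to_title
-- ===== SOURCE A (Python) =====
-- def param_name_to_title(pname):
--
--     title = ""
--
--     a = pname.split("_")
--     b = a[0]
--     glue = ' '
--     c = ''.join(glue + x if x.isupper() else x for x in b).strip(glue).split(glue)
--     d = ""
--     for word in c:
--         d += word
--         d += " "
--     title = d.title() #+ a[1].upper() dont add back the X, Y, Z, W
--
--     return title
-- ===== SOURCE B (Python) =====
-- def param_name_to_title(pname):
--     base = pname.split("_")[0].strip(' ')
--     out = []
--     prev_alpha = False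
--     for j, ch in enumerate(base):
--         if j > 0 and ch.isupper():
--             out.append(' ')
--             prev_alpha = False
--         if ch.isalpha():
--             out.append(ch.lower() if prev_alpha else ch.upper())
--             prev_alpha = True
--         else:
--             out.append(ch)
--             prev_alpha = False
--     out.append(' ')
--     return ''.join(out)
-- ===== Notes on version B (the rewrite author's own statement) =====
-- stated objective: simpler
-- what changed: B replaces A's staged pipeline (insert a space before each uppercase, strip, split on spaces, rejoin with trailing spaces, then .title()) by one fused pass over the stripped pre-underscore segment that emits every output character with its final case directly, tracking only a previous-character-was-alphabetic flag.
import Mathlib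
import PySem

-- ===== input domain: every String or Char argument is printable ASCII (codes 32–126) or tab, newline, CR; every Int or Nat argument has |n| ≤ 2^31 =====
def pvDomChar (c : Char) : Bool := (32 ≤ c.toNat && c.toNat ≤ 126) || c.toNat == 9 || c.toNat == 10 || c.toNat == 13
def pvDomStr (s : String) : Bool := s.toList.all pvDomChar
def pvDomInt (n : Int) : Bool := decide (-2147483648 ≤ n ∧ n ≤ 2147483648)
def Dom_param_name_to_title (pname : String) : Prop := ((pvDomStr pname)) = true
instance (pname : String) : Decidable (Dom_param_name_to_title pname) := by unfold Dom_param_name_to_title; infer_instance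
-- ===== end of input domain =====

-- B replaces A's staged pipeline (insert spaces, strip, split, rejoin, .title()) by one fused pass
-- that emits each output character with its final case directly (objective: simpler).

-- ===== PORT A =====
-- helper for A: Python str.title, exact on the ASCII domain (cased characters are 'a'-'z' and 'A'-'Z')
def pyTitleChars : Bool → List Char → List Char
  | _, [] => []
  | prev, c :: rest =>
    if PySem.Chars.isalpha c then
      (if prev then PySem.Chars.lowerChar c else PySem.Chars.upperChar c) :: pyTitleChars true rest
    else c :: pyTitleChars false rest

def param_name_to_title (pname : String) : String :=
  let a := PySem.Chars.splitOn pname.toList ['_']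
  let b := a.headD []          -- a[0]; str.split never returns an empty list
  let c := PySem.Chars.splitOn
      (PySem.Chars.stripChars
        (b.flatMap (fun x => if PySem.Chars.isupper x then [' ', x] else [x]))  -- ''.join(' '+x if x.isupper() else x for x in b)
        [' '])
      [' ']
  let d := c.foldl (fun d word => d ++ word ++ [' ']) []
  String.mk (pyTitleChars false d)

-- ===== PORT B =====
-- the loop of Source B: state = (j > 0, prev_alpha); emits final characters directly, then one trailing space
def pvAltGo : List Char → Bool → Bool → List Char
  | [], _, _ => [' ']
  | ch :: rest, notFirst, prev =>
    let sp : List Char := if notFirst && PySem.Chars.isupper ch then [' '] else []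
    let prev' : Bool := if notFirst && PySem.Chars.isupper ch then false else prev
    if PySem.Chars.isalpha ch then
      sp ++ ((if prev' then PySem.Chars.lowerChar ch else PySem.Chars.upperChar ch) :: pvAltGo rest true true)
    else
      sp ++ (ch :: pvAltGo rest true false)

def param_name_to_title_alt (pname : String) : String :=
  let base := PySem.Chars.stripChars ((PySem.Chars.splitOn pname.toList ['_']).headD []) [' ']
  String.mk (pvAltGo base false false)

-- ===== PRECONDITION & SPEC =====
def Spec_param_name_to_title (pname : String) (out : String) : Prop := out = param_name_to_title_alt pname
instance (pname : String) (out : String) : Decidable (Spec_param_name_to_title pname out) := by unfold Spec_param_name_to_title; infer_instance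

-- ===== CLAIM (what is proved, stated in full; the proofs are below) =====
def Claim_equal_param_name_to_title : Prop := ∀ (pname : String), Dom_param_name_to_title pname → Spec_param_name_to_title pname (param_name_to_title pname)

-- ===== LEMMAS AND PROOFS =====

-- proof-only abbreviations
def pvSp (c : Char) : Bool := [' '].contains c
def pvIns (s : List Char) : List Char :=
  s.flatMap (fun x => if PySem.Chars.isupper x then [' ', x] else [x])
def pvInsHead : List Char → List Char
  | [] => []
  | c :: r => c :: pvIns r
def pvRstrip (x : List Char) : List Char := (List.dropWhile pvSp x.reverse).reverse

theorem pv_sp_iff (c : Char) : pvSp c = true ↔ c = ' ' := by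
  simp [pvSp]

theorem pv_upper_alpha (c : Char) (h : PySem.Chars.isupper c = true) :
    PySem.Chars.isalpha c = true := by
  simp [PySem.Chars.isalpha, h]

theorem pv_strip_eq (s : List Char) :
    PySem.Chars.stripChars s [' '] = pvRstrip (List.dropWhile pvSp s) := rfl

-- ---- A-side pipeline reduction (join/split/fold): d = strip(inserted) ++ [' '] ----

theorem pv_join_cons (x : List Char) (ys : List (List Char)) (h : ys ≠ []) :
    PySem.Chars.join [' '] (x :: ys) = x ++ [' '] ++ PySem.Chars.join [' '] ys := by
  cases ys with
  | nil => exact absurd rfl h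
  | cons y ys => rw [PySem.Chars.join_cons_cons]

theorem pv_join_last2 (vs : List (List Char)) (u w : List Char) :
    PySem.Chars.join [' '] (vs ++ [u] ++ [w])
      = PySem.Chars.join [' '] (vs ++ [u]) ++ [' '] ++ w := by
  induction vs with
  | nil => simp [pv_join_cons, PySem.Chars.join_singleton]
  | cons v vs ih =>
      rw [List.cons_append, List.cons_append, pv_join_cons _ _ (by simp),
        pv_join_cons _ _ (by simp), ih]
      simp

theorem pv_foldl_concat (ws : List (List Char)) (acc : List Char) :
    ws.foldl (fun d word => d ++ word ++ [' ']) acc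
      = acc ++ (ws.map (· ++ [' '])).flatten := by
  induction ws generalizing acc with
  | nil => simp
  | cons w ws ih => simp [List.append_assoc]

theorem pv_flatten_join (ws : List (List Char)) (h : ws ≠ []) :
    (ws.map (· ++ [' '])).flatten = PySem.Chars.join [' '] ws ++ [' '] := by
  induction ws with
  | nil => exact absurd rfl h
  | cons w ws ih =>
      cases ws with
      | nil => simp [PySem.Chars.join_singleton]
      | cons w2 ws2 =>
          rw [List.map_cons, List.flatten_cons, ih (by simp),
            pv_join_cons w (w2 :: ws2) (by simp)]
          simp

theorem pv_go_ne_nil (fuel : Nat) (l cur : List Char) (acc : List (List Char)) :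
    PySem.Chars.splitOn.go [' '] fuel l cur acc ≠ [] := by
  induction fuel generalizing l cur acc with
  | zero => simp [PySem.Chars.splitOn.go]
  | succ n ih =>
      cases l with
      | nil => simp [PySem.Chars.splitOn.go]
      | cons c rest =>
          rw [PySem.Chars.splitOn.go]
          split
          · exact ih _ _ _
          · exact ih _ _ _

theorem pv_join_last_app (vs : List (List Char)) (w t : List Char) :
    PySem.Chars.join [' '] (vs ++ [w ++ t])
      = PySem.Chars.join [' '] (vs ++ [w]) ++ t := by
  induction vs with
  | nil => simp [PySem.Chars.join_singleton]
  | cons v vs ih =>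
      rw [List.cons_append, List.cons_append, pv_join_cons _ _ (by simp),
        pv_join_cons _ _ (by simp), ih]
      simp

theorem pv_go_join (fuel : Nat) (l cur : List Char) (acc : List (List Char))
    (h : l.length ≤ fuel) :
    PySem.Chars.join [' '] (PySem.Chars.splitOn.go [' '] fuel l cur acc)
      = PySem.Chars.join [' '] ((cur.reverse :: acc).reverse) ++ l := by
  induction fuel generalizing l cur acc with
  | zero =>
      have hl : l = [] := List.eq_nil_of_length_eq_zero (Nat.le_zero.mp h)
      subst hl
      simp [PySem.Chars.splitOn.go]
  | succ n ih =>
      cases l with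
      | nil => simp [PySem.Chars.splitOn.go]
      | cons c rest =>
          rw [PySem.Chars.splitOn.go]
          have hr : rest.length ≤ n := Nat.lt_succ_iff.mp (by simpa using h)
          by_cases hc : List.isPrefixOf [' '] (c :: rest) = true
          · have hceq : c = ' ' := by
              simp [List.isPrefixOf] at hc
              exact hc.symm
            rw [if_pos hc]
            rw [ih _ _ _ (by simpa using hr)]
            have : (([] : List Char).reverse :: cur.reverse :: acc).reverse
                = acc.reverse ++ [cur.reverse] ++ [([] : List Char)] := by simp
            rw [this, pv_join_last2]
            simp [hceq]
          · rw [if_neg hc]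
            rw [ih _ _ _ hr]
            have : ((c :: cur).reverse :: acc).reverse
                = acc.reverse ++ [cur.reverse ++ [c]] := by simp
            rw [this, pv_join_last_app]
            simp

theorem pv_join_splitOn (s : List Char) :
    PySem.Chars.join [' '] (PySem.Chars.splitOn s [' ']) = s := by
  rw [PySem.Chars.splitOn, pv_go_join _ _ _ _ (Nat.le_succ _)]
  simp [PySem.Chars.join_singleton]

theorem pv_splitOn_ne_nil (s : List Char) :
    PySem.Chars.splitOn s [' '] ≠ [] := by
  rw [PySem.Chars.splitOn]
  exact pv_go_ne_nil _ _ _ _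

-- ---- strip commutes with the space-insertion map ----

theorem pv_dropWhile_ins (s : List Char) :
    List.dropWhile pvSp (pvIns s) = pvInsHead (List.dropWhile pvSp s) := by
  induction s with
  | nil => rfl
  | cons c rest ih =>
      by_cases hc : pvSp c = true
      · have hce : c = ' ' := (pv_sp_iff c).mp hc
        have hup : PySem.Chars.isupper c = false := by rw [hce]; decide
        simp [pvIns, hup, hc] at *
        exact ih
      · by_cases hup : PySem.Chars.isupper c = true
        · have hsp : pvSp ' ' = true := by decide
          simp [pvIns, hup, hsp, hc, pvInsHead]
        · simp [pvIns, hup, hc, pvInsHead]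

theorem pv_rstrip_cons (c : Char) (r : List Char) (hc : ¬ pvSp c = true) :
    pvRstrip (c :: r) = c :: pvRstrip r := by
  unfold pvRstrip
  rw [List.reverse_cons, List.dropWhile_append]
  by_cases he : (List.dropWhile pvSp r.reverse).isEmpty = true
  · rw [if_pos he]
    rw [List.isEmpty_iff] at he
    simp [hc, he]
  · rw [if_neg he]
    simp

theorem pv_rstrip_snoc_sp (x : List Char) : pvRstrip (x ++ [' ']) = pvRstrip x := by
  unfold pvRstrip
  rw [List.reverse_append]
  simp [(by decide : pvSp ' ' = true)]

theorem pv_rstrip_snoc (x : List Char) (c : Char) (hc : ¬ pvSp c = true) :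
    pvRstrip (x ++ [c]) = x ++ [c] := by
  unfold pvRstrip
  rw [List.reverse_append]
  simp [hc]

theorem pv_rstrip_ins (s : List Char) : pvRstrip (pvIns s) = pvIns (pvRstrip s) := by
  induction s using List.reverseRecOn with
  | nil => rfl
  | append_singleton u c ih =>
      have hins : pvIns (u ++ [c]) = pvIns u ++ (if PySem.Chars.isupper c then [' ', c] else [c]) := by
        simp [pvIns]
      by_cases hc : pvSp c = true
      · have hce : c = ' ' := (pv_sp_iff c).mp hc
        have hup : PySem.Chars.isupper c = false := by rw [hce]; decide
        rw [hins, hup, if_neg (by simp), hce, pv_rstrip_snoc_sp, ih, pv_rstrip_snoc_sp]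
      · by_cases hup : PySem.Chars.isupper c = true
        · rw [hins, if_pos hup, pv_rstrip_snoc u c hc,
            show pvIns u ++ [' ', c] = (pvIns u ++ [' ']) ++ [c] by simp,
            pv_rstrip_snoc _ c hc]
          simp [pvIns, hup]
        · rw [hins, if_neg hup, pv_rstrip_snoc u c hc, pv_rstrip_snoc _ c hc]
          simp [pvIns, hup]

theorem pv_dropWhile_head (s : List Char) (c : Char) (r : List Char)
    (h : List.dropWhile pvSp s = c :: r) : pvSp c = false := by
  induction s with
  | nil => simp at h
  | cons a s ih =>
      rw [List.dropWhile_cons] at h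
      by_cases ha : pvSp a = true
      · rw [if_pos ha] at h; exact ih h
      · rw [if_neg ha] at h
        cases h
        exact Bool.not_eq_true _ |>.mp ha

theorem pv_strip_ins (b : List Char) :
    PySem.Chars.stripChars (pvIns b) [' ']
      = pvInsHead (PySem.Chars.stripChars b [' ']) := by
  rw [pv_strip_eq, pv_strip_eq, pv_dropWhile_ins]
  cases ht : List.dropWhile pvSp b with
  | nil => rfl
  | cons c r =>
      have hc : pvSp c = false := pv_dropWhile_head b c r ht
      have hc' : ¬ pvSp c = true := by simp [hc]
      show pvRstrip (c :: pvIns r) = pvInsHead (pvRstrip (c :: r))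
      rw [pv_rstrip_cons c _ hc', pv_rstrip_ins, pv_rstrip_cons c r hc']
      rfl

-- ---- the fused pass computes title(inserted + ' ') ----

theorem pv_title_go (r : List Char) (prev : Bool) :
    pyTitleChars prev (pvIns r ++ [' ']) = pvAltGo r true prev := by
  induction r generalizing prev with
  | nil => simp [pvIns, pyTitleChars, pvAltGo, (by decide : PySem.Chars.isalpha ' ' = false)]
  | cons c rs ih =>
      by_cases hup : PySem.Chars.isupper c = true
      · have hal : PySem.Chars.isalpha c = true := pv_upper_alpha c hup
        have h1 : pvIns (c :: rs) ++ [' '] = ' ' :: c :: (pvIns rs ++ [' ']) := by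
          simp [pvIns, hup]
        rw [h1]
        simp only [pyTitleChars, (by decide : PySem.Chars.isalpha ' ' = false), if_neg,
          Bool.false_eq_true, not_false_iff, hal, if_pos]
        rw [ih true]
        simp [pvAltGo, hup, hal]
      · have hup' : PySem.Chars.isupper c = false := by simp at hup; exact hup
        have h1 : pvIns (c :: rs) ++ [' '] = c :: (pvIns rs ++ [' ']) := by
          simp [pvIns, hup']
        rw [h1]
        by_cases hal : PySem.Chars.isalpha c = true
        · simp only [pyTitleChars, hal, if_pos]
          rw [ih true]
          simp [pvAltGo, hup', hal]
        · have hal' : PySem.Chars.isalpha c = false := by simp at hal; exact hal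
          simp only [pyTitleChars, hal', Bool.false_eq_true, if_neg, not_false_iff]
          rw [ih false]
          simp [pvAltGo, hup', hal']

theorem pv_title_insHead (t : List Char) :
    pyTitleChars false (pvInsHead t ++ [' ']) = pvAltGo t false false := by
  cases t with
  | nil => rfl
  | cons c r =>
      show pyTitleChars false (c :: (pvIns r ++ [' '])) = pvAltGo (c :: r) false false
      by_cases hal : PySem.Chars.isalpha c = true
      · simp only [pyTitleChars, hal, if_pos]
        rw [pv_title_go r true]
        simp [pvAltGo, hal]
      · have hal' : PySem.Chars.isalpha c = false := by simp at hal; exact hal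
        simp only [pyTitleChars, hal', Bool.false_eq_true, if_neg, not_false_iff]
        rw [pv_title_go r false]
        simp [pvAltGo, hal']

-- ===== VERDICT (by name: the statement is the Claim_ definition above) =====
theorem param_name_to_title_spec : Claim_equal_param_name_to_title := by
  intro pname _
  unfold Spec_param_name_to_title param_name_to_title param_name_to_title_alt
  simp only []
  congr 1
  rw [pv_foldl_concat, pv_flatten_join _ (pv_splitOn_ne_nil _), pv_join_splitOn]
  rw [show ((PySem.Chars.splitOn pname.toList ['_']).headD []).flatMap
        (fun x => if PySem.Chars.isupper x then [' ', x] else [x])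
      = pvIns ((PySem.Chars.splitOn pname.toList ['_']).headD []) from rfl]
  rw [pv_strip_ins]
  simpa using pv_title_insHead (PySem.Chars.stripChars ((PySem.Chars.splitOn pname.toList ['_']).headD []) [' '])
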